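-- pv_equiv track=rewrite | github.com/donotquestionauthority/blundriq-pipeline | depth_comparison.py | cls_breakdown_html
-- ===== SOURCE A (Python) =====
-- from collections import defaultdict
--
-- CLS_COLOR = {
--     "miss":       "#f43f5e",
--     "blunder":    "#ef4444",
--     "mistake":    "#f97316",
--     "inaccuracy": "#eab308",
--     None:         "#6b7280",
-- }
--
-- def cls_breakdown_html(blunders, proposed=False):
--     key    = "cls_proposed" if proposed else "cls_current"
--     counts = defaultdict(int)
--     for b in blunders:
--         if b[key]:
--             counts[b[key]] += 1
--     out = ""
--     for cls in ["miss", "blunder", "mistake", "inaccuracy"]: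
--         n     = counts.get(cls, 0)
--         color = CLS_COLOR[cls]
--         out  += (f'<span style="background:{color};color:white;padding:2px 8px;'
--                  f'border-radius:4px;margin:2px;display:inline-block">'
--                  f'{cls}: {n}</span> ')
--     return out
-- ===== SOURCE B (Python) =====
-- def cls_breakdown_html(blunders, proposed=False):
--     key = "cls_proposed" if proposed else "cls_current"
--     parts = []
--     for cls, color in [("miss", "#f43f5e"), ("blunder", "#ef4444"),
--                        ("mistake", "#f97316"), ("inaccuracy", "#eab308")]:
--         n = sum(1 for b in blunders if b[key] == cls)
--         parts.append(f'<span style="background:{color};color:white;padding:2px 8px;'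
--                      f'border-radius:4px;margin:2px;display:inline-block">'
--                      f'{cls}: {n}</span> ')
--     return "".join(parts)
-- ===== Notes on version B (the rewrite author's own statement) =====
-- stated objective: simpler
-- what changed: Drops the defaultdict counting pre-pass and the CLS_COLOR lookup table: B loops over the four (class, color) pairs and counts matches for each class by rescanning blunders directly, joining the parts at the end.
import Mathlib
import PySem

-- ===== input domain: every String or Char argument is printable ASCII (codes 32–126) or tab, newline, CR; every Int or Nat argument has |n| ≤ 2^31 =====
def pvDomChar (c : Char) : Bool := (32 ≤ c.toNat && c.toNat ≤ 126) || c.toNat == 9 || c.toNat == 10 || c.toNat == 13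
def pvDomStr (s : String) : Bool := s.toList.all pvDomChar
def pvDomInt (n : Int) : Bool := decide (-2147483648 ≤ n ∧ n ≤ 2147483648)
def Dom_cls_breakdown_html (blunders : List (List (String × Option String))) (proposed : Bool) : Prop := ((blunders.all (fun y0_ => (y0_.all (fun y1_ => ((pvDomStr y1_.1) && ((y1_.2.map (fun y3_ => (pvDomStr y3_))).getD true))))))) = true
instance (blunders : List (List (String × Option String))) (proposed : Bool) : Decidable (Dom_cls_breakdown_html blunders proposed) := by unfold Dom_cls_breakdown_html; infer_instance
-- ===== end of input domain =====

-- B drops the defaultdict counting pre-pass and the CLS_COLOR lookup table: it rescans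
-- blunders once per class (four fixed (class, color) pairs) and joins the parts at the end.


-- ===== PORT A =====
-- CLS_COLOR module constant; A only ever looks up present keys (the four class strings),
-- so the `.getD ""` default in the port is never reached under Pre_.
def CLS_COLOR : PySem.Dict (Option String) String :=
  PySem.Dict.ofList [(some "miss", "#f43f5e"), (some "blunder", "#ef4444"),
                     (some "mistake", "#f97316"), (some "inaccuracy", "#eab308"),
                     (none, "#6b7280")]

-- loop body of A's counting pass: if b[key]: counts[b[key]] += 1  (b[key] truthy ⇔ some nonempty string)
def countStep (key : String) (c : PySem.Dict String Int) (b : List (String × Option String)) : PySem.Dict String Int :=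
  match PySem.Dict.get? (PySem.Dict.mk b) key with
  | some (some s) => if s ≠ "" then c.modify s 0 (· + 1) else c
  | _ => c

def cls_breakdown_html (blunders : List (List (String × Option String))) (proposed : Bool) : String :=
  let key := if proposed then "cls_proposed" else "cls_current"
  let counts : PySem.Dict String Int := blunders.foldl (countStep key) PySem.Dict.empty
  ["miss", "blunder", "mistake", "inaccuracy"].foldl (fun out cls =>
    let n := counts.getD cls 0
    let color := (CLS_COLOR.get? (some cls)).getD ""
    out ++ ("<span style=\"background:" ++ color ++ ";color:white;padding:2px 8px;" ++
            "border-radius:4px;margin:2px;display:inline-block\">" ++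
            cls ++ ": " ++ PySem.Int.toStr n ++ "</span> ")) ""

-- ===== PORT B =====
def cls_breakdown_html_alt (blunders : List (List (String × Option String))) (proposed : Bool) : String :=
  let key := if proposed then "cls_proposed" else "cls_current"
  let parts :=
    [("miss", "#f43f5e"), ("blunder", "#ef4444"),
     ("mistake", "#f97316"), ("inaccuracy", "#eab308")].map (fun p =>
      let n := blunders.foldl (fun acc b =>
        if PySem.Dict.get? (PySem.Dict.mk b) key == some (some p.1) then acc + 1 else acc) (0 : Int)
      "<span style=\"background:" ++ p.2 ++ ";color:white;padding:2px 8px;" ++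
      "border-radius:4px;margin:2px;display:inline-block\">" ++
      p.1 ++ ": " ++ PySem.Int.toStr n ++ "</span> ")
  PySem.Str.join "" parts

-- ===== PRECONDITION & SPEC =====
-- Pre_ excludes exactly the inputs where some blunder dict lacks the selected key:
-- there Python A (and Python B alike) raises KeyError on b[key].
def Pre_cls_breakdown_html (blunders : List (List (String × Option String))) (proposed : Bool) : Prop :=
  ∀ b ∈ blunders, (if proposed then "cls_proposed" else "cls_current") ∈ b.map Prod.fst
instance (blunders : List (List (String × Option String))) (proposed : Bool) : Decidable (Pre_cls_breakdown_html blunders proposed) := by unfold Pre_cls_breakdown_html; infer_instance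

def pvWitness_cls_breakdown_html : (List (List (String × Option String))) × Bool :=
  ([[("cls_current", some "miss")], [("cls_current", none)]], false)

def Spec_cls_breakdown_html (blunders : List (List (String × Option String))) (proposed : Bool) (out : String) : Prop := out = cls_breakdown_html_alt blunders proposed
instance (blunders : List (List (String × Option String))) (proposed : Bool) (out : String) : Decidable (Spec_cls_breakdown_html blunders proposed out) := by unfold Spec_cls_breakdown_html; infer_instance

-- ===== CLAIM (what is proved, stated in full; the proofs are below) =====
def Claim_equal_cls_breakdown_html : Prop := ∀ (blunders : List (List (String × Option String))) (proposed : Bool), Dom_cls_breakdown_html blunders proposed → Pre_cls_breakdown_html blunders proposed → Spec_cls_breakdown_html blunders proposed (cls_breakdown_html blunders proposed)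

-- ===== LEMMAS AND PROOFS =====

-- does blunder b match class cls under lookup key?
def pvMatch (key cls : String) (b : List (String × Option String)) : Bool :=
  PySem.Dict.get? (PySem.Dict.mk b) key == some (some cls)

-- B's rescan fold is the matching count.
lemma foldB_eq_countP (key cls : String) (bs : List (List (String × Option String))) (n : Int) :
    bs.foldl (fun acc b =>
      if PySem.Dict.get? (PySem.Dict.mk b) key == some (some cls) then acc + 1 else acc) n
    = n + (bs.countP (pvMatch key cls) : Int) := by
  induction bs generalizing n with
  | nil => simp
  | cons b bs ih =>
    rw [List.foldl_cons, List.countP_cons, ih]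
    by_cases h : pvMatch key cls b
    · simp only [pvMatch] at h
      simp [h, pvMatch]
      ring
    · simp only [pvMatch] at h
      simp [h, pvMatch]

-- A's count table, read at a nonempty class string, is the matching count.
lemma foldA_getD (key cls : String) (hcls : cls ≠ "") (bs : List (List (String × Option String)))
    (d : PySem.Dict String Int) :
    (bs.foldl (countStep key) d).getD cls 0
    = d.getD cls 0 + (bs.countP (pvMatch key cls) : Int) := by
  induction bs generalizing d with
  | nil => simp
  | cons b bs ih =>
    rw [List.foldl_cons, List.countP_cons, ih]
    rcases hv : PySem.Dict.get? (PySem.Dict.mk b) key with _ | v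
    · simp [countStep, pvMatch, hv]
    · rcases v with _ | s
      · simp [countStep, pvMatch, hv]
      · by_cases hs : s = ""
        · subst hs
          simp [countStep, pvMatch, hv, Ne.symm hcls]
        · by_cases hsc : s = cls
          · subst hsc
            simp [countStep, pvMatch, hv, hs, PySem.Dict.getD_modify_self]
            ring
          · simp [countStep, pvMatch, hv, hs, hsc,
              PySem.Dict.getD_modify_of_ne d 0 (· + 1) (Ne.symm hsc)]

-- "".join of the four parts is plain left-to-right concatenation.
lemma join_four (a b c d : String) : PySem.Str.join "" [a, b, c, d] = (((("" ++ a) ++ b) ++ c) ++ d) := by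
  simp [PySem.Str.join, PySem.Chars.join_cons_cons, PySem.Chars.join_singleton, String.append_assoc]

-- ===== VERDICT (by name: the statement is the Claim_ definition above) =====
theorem cls_breakdown_html_spec : Claim_equal_cls_breakdown_html := by
  intro blunders proposed _ _
  show _ = _
  unfold cls_breakdown_html cls_breakdown_html_alt
  simp only [List.foldl, List.map]
  rw [foldA_getD _ "miss" (by decide), foldA_getD _ "blunder" (by decide),
      foldA_getD _ "mistake" (by decide), foldA_getD _ "inaccuracy" (by decide),
      foldB_eq_countP, foldB_eq_countP, foldB_eq_countP, foldB_eq_countP, join_four]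
  have h1 : (CLS_COLOR.get? (some "miss")).getD "" = "#f43f5e" := by decide
  have h2 : (CLS_COLOR.get? (some "blunder")).getD "" = "#ef4444" := by decide
  have h3 : (CLS_COLOR.get? (some "mistake")).getD "" = "#f97316" := by decide
  have h4 : (CLS_COLOR.get? (some "inaccuracy")).getD "" = "#eab308" := by decide
  rw [h1, h2, h3, h4]
  simp [PySem.Dict.getD, PySem.Dict.get?, PySem.Dict.empty, String.append_assoc]
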